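-- pv_equiv track=rewrite | github.com/joelpaulp/PDFparserAI | retriever.py | split_markdown_into_chunks
-- ===== SOURCE A (Python) =====
-- def split_markdown_into_chunks(markdown_text, max_chunk_tokens=300):
--     """
--     Structure-aware chunking: starts new chunk at headings and maintains logical grouping.
--     """
--     chunks = []
--     current = []
--     current_token_count = 0
--
--     for line in markdown_text.splitlines():
--         # New section starts at heading
--         if line.strip().startswith(("#", "##", "###")) and current:
--             chunks.append("\n".join(current).strip())
--             current = []
--             current_token_count = 0
--
--         current.append(line)
--         current_token_count += len(line.split())
--
--         if current_token_count >= max_chunk_tokens: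
--             chunks.append("\n".join(current).strip())
--             current = []
--             current_token_count = 0
--
--     if current:
--         chunks.append("\n".join(current).strip())
--
--     return chunks
-- ===== SOURCE B (Python) =====
-- def split_markdown_into_chunks(markdown_text, max_chunk_tokens=300):
--     # Two-phase: partition lines into heading-led sections, then run the
--     # token-budget accumulation inside each section.
--     sections = []
--     open_sec = []
--     for line in markdown_text.splitlines():
--         if line.strip().startswith("#") and open_sec:
--             sections.append(open_sec)
--             open_sec = [line]
--         else:
--             open_sec.append(line)
--     if open_sec:
--         sections.append(open_sec)
--
--     chunks = []
--     for sec in sections: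
--         buf = []
--         count = 0
--         for line in sec:
--             buf.append(line)
--             count += len(line.split())
--             if count >= max_chunk_tokens:
--                 chunks.append("\n".join(buf).strip())
--                 buf = []
--                 count = 0
--         if buf:
--             chunks.append("\n".join(buf).strip())
--     return chunks
-- ===== Notes on version B (the rewrite author's own statement) =====
-- stated objective: alternative
-- what changed: Replaces A's single flat flag-driven loop by a two-phase nested decomposition: one pass partitions the lines into heading-led sections, then a per-section inner loop does only the token-budget accumulation (the heading test disappears from the chunking loop).
import Mathlib
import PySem

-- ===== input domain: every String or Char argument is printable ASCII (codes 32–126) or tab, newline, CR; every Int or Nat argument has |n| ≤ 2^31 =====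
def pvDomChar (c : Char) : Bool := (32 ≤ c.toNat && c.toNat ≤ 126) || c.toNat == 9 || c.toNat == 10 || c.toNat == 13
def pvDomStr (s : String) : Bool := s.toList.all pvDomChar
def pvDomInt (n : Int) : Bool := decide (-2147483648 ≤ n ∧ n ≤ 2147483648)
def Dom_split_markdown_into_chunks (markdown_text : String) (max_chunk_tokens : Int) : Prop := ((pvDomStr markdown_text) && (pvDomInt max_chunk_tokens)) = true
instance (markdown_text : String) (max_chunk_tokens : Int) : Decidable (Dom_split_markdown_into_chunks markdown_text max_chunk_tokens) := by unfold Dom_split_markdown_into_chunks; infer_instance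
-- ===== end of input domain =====

-- B replaces A's flat flag-driven loop by a two-phase nested decomposition
-- (partition into heading-led sections, then per-section token-budget chunking);
-- same cost, proved to return the same list.

-- ===== PORT A =====
-- "\n".join(xs).strip()  (used verbatim by both Pythons)
def pvJoinStrip (xs : List String) : String := PySem.Str.strip (PySem.Str.join "\n" xs)
-- len(line.split())
def pvTok (line : String) : Int := ((PySem.Str.split₀ line).length : Int)

-- literal transliteration of A: one fold over the lines with state (chunks, current, current_token_count)
def split_markdown_into_chunks (markdown_text : String) (max_chunk_tokens : Int) : List String :=
  let fin := (PySem.Str.splitlines markdown_text).foldl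
    (fun (st : List String × List String × Int) (line : String) =>
      let st :=
        if (PySem.Str.startswith (PySem.Str.strip line) "#" ||
            PySem.Str.startswith (PySem.Str.strip line) "##" ||
            PySem.Str.startswith (PySem.Str.strip line) "###") && !st.2.1.isEmpty then
          (st.1 ++ [pvJoinStrip st.2.1], ([] : List String), (0 : Int))
        else st
      let current := st.2.1 ++ [line]
      let cnt := st.2.2 + pvTok line
      if max_chunk_tokens ≤ cnt then (st.1 ++ [pvJoinStrip current], ([] : List String), (0 : Int))
      else (st.1, current, cnt))
    ([], [], 0)
  if fin.2.1.isEmpty then fin.1 else fin.1 ++ [pvJoinStrip fin.2.1]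

-- ===== PORT B =====
-- line.strip().startswith("#")
def pvIsHeading (line : String) : Bool := PySem.Str.startswith (PySem.Str.strip line) "#"

-- phase 1: partition the lines into sections (state (sections, open_sec))
def pvSecStep (st : List (List String) × List String) (line : String) : List (List String) × List String :=
  if pvIsHeading line && !st.2.isEmpty then (st.1 ++ [st.2], [line]) else (st.1, st.2 ++ [line])

def pvSections (lines : List String) : List (List String) :=
  let st := lines.foldl pvSecStep ([], [])
  if st.2.isEmpty then st.1 else st.1 ++ [st.2]

-- phase 2 inner step: append line, count tokens, flush on reaching the budget
def pvStepB (m : Int) (st : List String × List String × Int) (line : String) : List String × List String × Int :=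
  let buf := st.2.1 ++ [line]
  let cnt := st.2.2 + pvTok line
  if m ≤ cnt then (st.1 ++ [pvJoinStrip buf], ([] : List String), (0 : Int))
  else (st.1, buf, cnt)

-- process one section: token loop, then flush the remaining buffer
def pvProcSec (m : Int) (chunks : List String) (sec : List String) : List String :=
  let st := sec.foldl (pvStepB m) (chunks, [], 0)
  if st.2.1.isEmpty then st.1 else st.1 ++ [pvJoinStrip st.2.1]

def split_markdown_into_chunks_alt (markdown_text : String) (max_chunk_tokens : Int) : List String :=
  (pvSections (PySem.Str.splitlines markdown_text)).foldl (pvProcSec max_chunk_tokens) []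

-- ===== PRECONDITION & SPEC =====
def Spec_split_markdown_into_chunks (markdown_text : String) (max_chunk_tokens : Int) (out : List String) : Prop := out = split_markdown_into_chunks_alt markdown_text max_chunk_tokens
instance (markdown_text : String) (max_chunk_tokens : Int) (out : List String) : Decidable (Spec_split_markdown_into_chunks markdown_text max_chunk_tokens out) := by unfold Spec_split_markdown_into_chunks; infer_instance

-- ===== CLAIM (what is proved, stated in full; the proofs are below) =====
def Claim_equal_split_markdown_into_chunks : Prop := ∀ (markdown_text : String) (max_chunk_tokens : Int), Dom_split_markdown_into_chunks markdown_text max_chunk_tokens → Spec_split_markdown_into_chunks markdown_text max_chunk_tokens (split_markdown_into_chunks markdown_text max_chunk_tokens)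

-- ===== LEMMAS AND PROOFS =====

-- A's step function, named for the proofs (definitionally the lambda inside port A)
def pvStepA (m : Int) (st : List String × List String × Int) (line : String) : List String × List String × Int :=
  let st :=
    if (PySem.Str.startswith (PySem.Str.strip line) "#" ||
        PySem.Str.startswith (PySem.Str.strip line) "##" ||
        PySem.Str.startswith (PySem.Str.strip line) "###") && !st.2.1.isEmpty then
      (st.1 ++ [pvJoinStrip st.2.1], ([] : List String), (0 : Int))
    else st
  let current := st.2.1 ++ [line]
  let cnt := st.2.2 + pvTok line
  if m ≤ cnt then (st.1 ++ [pvJoinStrip current], ([] : List String), (0 : Int))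
  else (st.1, current, cnt)

-- final trailing flush (shape shared by A's epilogue and pvProcSec's epilogue)
def pvFin (st : List String × List String × Int) : List String :=
  if st.2.1.isEmpty then st.1 else st.1 ++ [pvJoinStrip st.2.1]

lemma pvFin_eq_procSec (m : Int) (c0 : List String) (sec : List String) :
    pvProcSec m c0 sec = pvFin (sec.foldl (pvStepB m) (c0, [], 0)) := rfl

-- A's heading test collapses to B's: startswith "##" or "###" implies startswith "#"
lemma pvHead_eq (line : String) :
    (PySem.Str.startswith (PySem.Str.strip line) "#" ||
     PySem.Str.startswith (PySem.Str.strip line) "##" ||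
     PySem.Str.startswith (PySem.Str.strip line) "###") = pvIsHeading line := by
  unfold pvIsHeading
  rcases h : PySem.Str.startswith (PySem.Str.strip line) "#" with _ | _
  · have h' : PySem.Chars.startswith (PySem.Chars.strip line.toList) ['#'] = false := by
      simpa using h
    have h1 : ¬ (['#'] <+: PySem.Chars.strip line.toList) := by
      rw [← PySem.Chars.startswith_iff, h']; simp
    have h2 : PySem.Chars.startswith (PySem.Chars.strip line.toList) ['#', '#'] = false := by
      rw [← Bool.not_eq_true, PySem.Chars.startswith_iff]
      exact fun hp => h1 (List.IsPrefix.trans (by decide) hp)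
    have h3 : PySem.Chars.startswith (PySem.Chars.strip line.toList) ['#', '#', '#'] = false := by
      rw [← Bool.not_eq_true, PySem.Chars.startswith_iff]
      exact fun hp => h1 (List.IsPrefix.trans (by decide) hp)
    simp [h2, h3]
  · simp

-- a non-heading line (or an empty buffer) is processed identically by both step functions
lemma pvStepA_eq_stepB (m : Int) (st : List String × List String × Int) (line : String)
    (h : pvIsHeading line = false ∨ st.2.1 = []) :
    pvStepA m st line = pvStepB m st line := by
  unfold pvStepA pvStepB
  rw [pvHead_eq]
  rcases h with h | h <;> simp [h]

-- a heading line seen from any state equals B's step from the flushed state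
lemma pvStepA_heading (m : Int) (st : List String × List String × Int) (line : String)
    (hh : pvIsHeading line = true) (hc : st.2.2 = 0 ∨ st.2.1 ≠ []) :
    pvStepA m st line = pvStepB m (pvFin st, [], 0) line := by
  unfold pvStepA pvStepB pvFin
  rw [pvHead_eq]
  by_cases he : st.2.1 = []
  · rcases hc with hc | hc
    · simp [he, hh, hc]
    · exact absurd he hc
  · simp [he, hh]

-- invariant of B's inner fold: an empty buffer always goes with a zero counter
lemma pvStepB_inv (m : Int) (st : List String × List String × Int) (line : String) :
    (pvStepB m st line).2.1 = [] → (pvStepB m st line).2.2 = 0 := by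
  by_cases hm : m ≤ st.2.2 + pvTok line <;> simp [pvStepB, hm]

lemma pvFoldB_inv (m : Int) (sec : List String) (st : List String × List String × Int)
    (h : st.2.1 = [] → st.2.2 = 0) :
    (sec.foldl (pvStepB m) st).2.1 = [] → (sec.foldl (pvStepB m) st).2.2 = 0 := by
  induction sec generalizing st with
  | nil => exact h
  | cons l ls ih => exact ih _ (pvStepB_inv m st l)

-- structural (recursive) form of the section partition
def pvBsecs : List String → List String → List (List String)
  | [], open_sec => if open_sec.isEmpty then [] else [open_sec]
  | l :: ls, open_sec =>
      if pvIsHeading l && !open_sec.isEmpty then open_sec :: pvBsecs ls [l]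
      else pvBsecs ls (open_sec ++ [l])

-- closing step of the section partition, named for the proofs
def pvFinS (st : List (List String) × List String) : List (List String) :=
  if st.2.isEmpty then st.1 else st.1 ++ [st.2]

-- the fold-built sections are the accumulated prefix plus the structural partition
lemma pvSections_eq_bsecs (lines : List String) :
    ∀ (secs : List (List String)) (open_sec : List String),
      pvFinS (lines.foldl pvSecStep (secs, open_sec)) = secs ++ pvBsecs lines open_sec := by
  induction lines with
  | nil =>
      intro secs open_sec
      by_cases h : open_sec.isEmpty <;> simp [h, pvBsecs, pvFinS]
  | cons l ls ih =>
      intro secs open_sec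
      rw [List.foldl_cons]
      by_cases h : (pvIsHeading l && !open_sec.isEmpty) = true
      · rw [show pvSecStep (secs, open_sec) l = (secs ++ [open_sec], [l]) from by
            simp [pvSecStep, h]]
        rw [ih (secs ++ [open_sec]) [l]]
        simp [pvBsecs, h]
      · rw [show pvSecStep (secs, open_sec) l = (secs, open_sec ++ [l]) from by
            simp [pvSecStep, h]]
        rw [ih secs (open_sec ++ [l])]
        simp [pvBsecs, h]

lemma pvSections_eq (lines : List String) : pvSections lines = pvBsecs lines [] := by
  have h := pvSections_eq_bsecs lines [] []
  simpa [pvSections, pvFinS] using h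

-- MAIN: running A's loop from the state B's inner fold reaches on the open section
-- equals B's per-section processing of the structural partition
lemma pvMain (m : Int) (lines : List String) :
    ∀ (open_sec : List String) (c0 : List String),
      pvFin (lines.foldl (pvStepA m) (open_sec.foldl (pvStepB m) (c0, [], 0)))
        = (pvBsecs lines open_sec).foldl (pvProcSec m) c0 := by
  induction lines with
  | nil =>
      intro open_sec c0
      by_cases h : open_sec.isEmpty
      · have he : open_sec = [] := by simpa using h
        simp [he, pvBsecs, pvFin]
      · simp only [List.foldl_nil, pvBsecs, h, Bool.false_eq_true, if_false, List.foldl_cons]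
        rw [pvFin_eq_procSec]
  | cons l ls ih =>
      intro open_sec c0
      have hst := pvFoldB_inv m open_sec (c0, [], 0) (fun _ => rfl)
      set st := open_sec.foldl (pvStepB m) (c0, [], 0) with hstdef
      simp only [List.foldl_cons]
      by_cases h : (pvIsHeading l && !open_sec.isEmpty) = true
      · have hh : pvIsHeading l = true := by simp_all
        simp only [pvBsecs, h, if_true, List.foldl_cons]
        rw [pvFin_eq_procSec, ← ih [l] (pvFin st)]
        simp only [List.foldl_cons, List.foldl_nil]
        rw [pvStepA_heading m st l hh (by by_cases hb : st.2.1 = []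
                                          · exact Or.inl (hst hb)
                                          · exact Or.inr hb)]
      · simp only [pvBsecs, h, Bool.false_eq_true, if_false]
        rw [← ih (open_sec ++ [l]) c0, List.foldl_append]
        simp only [List.foldl_cons, List.foldl_nil]
        have hcase : pvIsHeading l = false ∨ st.2.1 = [] := by
          by_cases hhl : pvIsHeading l = true
          · right
            have he : open_sec = [] := by
              by_contra hne
              exact h (by simp [hhl, hne])
            rw [hstdef, he]
            rfl
          · exact Or.inl (by simpa using hhl)
        rw [pvStepA_eq_stepB m st l hcase]

-- ===== VERDICT (by name: the statement is the Claim_ definition above) =====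
theorem split_markdown_into_chunks_spec : Claim_equal_split_markdown_into_chunks := by
  intro t m _
  unfold Spec_split_markdown_into_chunks split_markdown_into_chunks split_markdown_into_chunks_alt
  rw [pvSections_eq]
  have hmain := pvMain m (PySem.Str.splitlines t) [] []
  simp only [List.foldl_nil] at hmain
  rw [← hmain]
  rfl
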